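-- pv_equiv track=rewrite | github.com/beta-test-Ronan/QuintikusOpen | QuintikusOpenDoomoble.py | corrigir_ortografia
-- ===== SOURCE A (Python) =====
-- def corrigir_ortografia(texto, vocabulario):
--     palavras = texto.split()
--     corrigidas = []
--     for p in palavras:
--         if p in vocabulario:
--             corrigidas.append(p)
--         else:
--             for v in vocabulario:
--                 if len(p) == len(v) and sum(c1 != c2 for c1, c2 in zip(p, v)) <= 1:
--                     corrigidas.append(v); break
--             else:
--                 corrigidas.append(p)
--     return ' '.join(corrigidas)
-- ===== SOURCE B (Python) =====
-- def corrigir_ortografia(texto, vocabulario):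
--     # Wildcard index: key = (prefix, suffix) of a vocab word with one position
--     # masked out, value = the smallest vocab index producing that key.
--     exact = set(vocabulario)
--     lengths = {len(v) for v in vocabulario}
--     index = {}
--     for i, v in enumerate(vocabulario):
--         for j in range(len(v)):
--             index.setdefault((v[:j], v[j + 1:]), i)
--     out = []
--     for p in texto.split():
--         if p in exact:
--             out.append(p)
--         else:
--             best = None
--             if len(p) in lengths:  # only same-length vocab words can match
--                 for j in range(len(p)):
--                     i = index.get((p[:j], p[j + 1:]))
--                     if i is not None and (best is None or i < best):
--                         best = i
--             out.append(p if best is None else vocabulario[best])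
--     return ' '.join(out)
-- ===== Notes on version B (the rewrite author's own statement) =====
-- stated objective: alternative
-- what changed: Replaces the per-word linear Hamming scan over the whole vocabulary by a precomputed wildcard index (each vocabulary word keyed under every one-position-masked (prefix,suffix) pair, keeping the smallest index) plus a set of vocabulary lengths; each text word looks up its own masked variants and takes the minimal index, so the inner word-by-vocabulary scan disappears.
import Mathlib
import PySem

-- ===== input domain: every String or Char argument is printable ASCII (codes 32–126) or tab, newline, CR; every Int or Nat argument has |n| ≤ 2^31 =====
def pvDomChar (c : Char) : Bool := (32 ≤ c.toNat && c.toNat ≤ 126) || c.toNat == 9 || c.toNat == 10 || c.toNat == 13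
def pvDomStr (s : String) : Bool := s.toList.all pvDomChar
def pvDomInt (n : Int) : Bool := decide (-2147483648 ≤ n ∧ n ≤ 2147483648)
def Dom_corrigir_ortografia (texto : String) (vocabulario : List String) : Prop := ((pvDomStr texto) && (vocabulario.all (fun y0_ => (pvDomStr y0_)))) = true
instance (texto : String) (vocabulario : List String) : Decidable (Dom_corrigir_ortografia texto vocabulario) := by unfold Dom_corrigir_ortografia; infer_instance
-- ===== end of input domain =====

-- B replaces A's per-word linear Hamming scan of the vocabulary with a precomputed
-- wildcard (one-position-masked) index and a set of vocabulary lengths; return values agree.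

-- ===== PORT A =====
-- sum(c1 != c2 for c1, c2 in zip(p, v))
def pvMismatch (p v : List Char) : Nat :=
  ((p.zip v).map (fun c => if c.1 ≠ c.2 then 1 else 0)).sum

-- inner 'for v in vocabulario: … break / else:' loop of A
def pvAFind (p : String) : List String → String
  | [] => p
  | v :: rest =>
    if p.toList.length = v.toList.length ∧ pvMismatch p.toList v.toList ≤ 1 then v
    else pvAFind p rest

def corrigir_ortografia (texto : String) (vocabulario : List String) : String :=
  let palavras := PySem.Str.split₀ texto
  let corrigidas := palavras.foldl (fun acc p =>
      if vocabulario.contains p then acc ++ [p] else acc ++ [pvAFind p vocabulario]) []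
  PySem.Str.join " " corrigidas

-- ===== PORT B =====
-- the wildcard keys (v[:j], v[j+1:]) for j in range(len(v)); Nat-bounded slices are take/drop
def pvMaskKeys (v : List Char) : List (List Char × List Char) :=
  (List.range v.length).map (fun j => (v.take j, v.drop (j + 1)))

-- 'for i, v in enumerate(vocabulario): for j in range(len(v)): index.setdefault((v[:j], v[j+1:]), i)'
def pvBuildIdx : List String → Nat → PySem.Dict (List Char × List Char) Nat →
    PySem.Dict (List Char × List Char) Nat
  | [], _, d => d
  | v :: rest, i, d =>
      pvBuildIdx rest (i + 1) ((pvMaskKeys v.toList).foldl (fun d k => d.setdefault k i) d)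

-- 'if i is not None and (best is None or i < best): best = i'
def pvOmin : Option Nat → Option Nat → Option Nat
  | best, none => best
  | none, some i => some i
  | some b, some i => if i < b then some i else some b

def pvBFind (vocabulario : List String)
    (idx : PySem.Dict (List Char × List Char) Nat) (lengths : PySem.Set Nat) (p : String) : String :=
  let best :=
    if PySem.Set.contains lengths p.toList.length then  -- only same-length vocab words can match
      (List.range p.toList.length).foldl
        (fun best j => pvOmin best (idx.get? (p.toList.take j, p.toList.drop (j + 1)))) none
    else none
  match best with
  | none => p
  | some b => vocabulario.getD b p  -- b is always an index into vocabulario; the default is never used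

def corrigir_ortografia_alt (texto : String) (vocabulario : List String) : String :=
  let exact : PySem.Set String := PySem.Set.ofList vocabulario
  let lengths : PySem.Set Nat := PySem.Set.ofList (vocabulario.map (fun v => v.toList.length))
  let idx := pvBuildIdx vocabulario 0 (PySem.Dict.mk [])
  let out := (PySem.Str.split₀ texto).foldl (fun acc p =>
      if PySem.Set.contains exact p then acc ++ [p]
      else acc ++ [pvBFind vocabulario idx lengths p]) []
  PySem.Str.join " " out

-- ===== PRECONDITION & SPEC =====
def Spec_corrigir_ortografia (texto : String) (vocabulario : List String) (out : String) : Prop := out = corrigir_ortografia_alt texto vocabulario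
instance (texto : String) (vocabulario : List String) (out : String) : Decidable (Spec_corrigir_ortografia texto vocabulario out) := by unfold Spec_corrigir_ortografia; infer_instance

-- ===== CLAIM (what is proved, stated in full; the proofs are below) =====
def Claim_equal_corrigir_ortografia : Prop := ∀ (texto : String) (vocabulario : List String), Dom_corrigir_ortografia texto vocabulario → Spec_corrigir_ortografia texto vocabulario (corrigir_ortografia texto vocabulario)

-- ===== LEMMAS AND PROOFS =====

-- A's inner-loop predicate, as a Bool
def pvApred (p v : String) : Bool :=
  decide (p.toList.length = v.toList.length ∧ pvMismatch p.toList v.toList ≤ 1)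

theorem pvAFind_eq_findIdx? (p : String) (l : List String) :
    pvAFind p l = match l.findIdx? (pvApred p) with
      | none => p
      | some b => l.getD b p := by
  induction l with
  | nil => rfl
  | cons v rest ih =>
    by_cases h : p.toList.length = v.toList.length ∧ pvMismatch p.toList v.toList ≤ 1
    · simp only [pvAFind]
      rw [if_pos h, List.findIdx?_cons,
        show pvApred p v = true from decide_eq_true h]
      simp
    · simp only [pvAFind]
      rw [if_neg h, List.findIdx?_cons,
        show pvApred p v = false from decide_eq_false h, ih]
      simp only [Bool.false_eq_true, if_false]
      cases rest.findIdx? (pvApred p) with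
      | none => rfl
      | some b => simp

theorem pvOmin_none_left (a : Option Nat) : pvOmin none a = a := by
  cases a <;> rfl

theorem pvOmin_none_right (a : Option Nat) : pvOmin a none = a := by
  cases a <;> rfl

theorem pvOmin_some_some (b i : Nat) : pvOmin (some b) (some i) = some (min i b) := by
  simp only [pvOmin]
  split_ifs with h <;> (congr 1; omega)

theorem pvOmin_assoc (a b c : Option Nat) :
    pvOmin (pvOmin a b) c = pvOmin a (pvOmin b c) := by
  cases a <;> cases b <;> cases c <;>
    simp only [pvOmin_none_left, pvOmin_none_right, pvOmin_some_some] <;>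
    first
      | rfl
      | (congr 1; omega)

theorem pvOmin_map_succ (a b : Option Nat) :
    pvOmin (a.map (· + 1)) (b.map (· + 1)) = (pvOmin a b).map (· + 1) := by
  cases a <;> cases b <;>
    simp only [Option.map_none, Option.map_some, pvOmin_none_left, pvOmin_none_right,
      pvOmin_some_some] <;>
    first
      | rfl
      | (congr 1; omega)

theorem pvFindIdx?_or {α : Type} (l : List α) (f g : α → Bool) :
    pvOmin (l.findIdx? f) (l.findIdx? g) = l.findIdx? (fun v => f v || g v) := by
  induction l with
  | nil => rfl
  | cons a l ih =>
    by_cases hf : f a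
    · have h0 : ∀ x : Option Nat, pvOmin (some 0) x = some 0 := by
        intro x
        cases x with
        | none => rfl
        | some i => simp [pvOmin]
      simp [List.findIdx?_cons, hf, h0]
    · by_cases hg : g a
      · have h0 : ∀ x : Option Nat, pvOmin (x.map (fun i => i + 1)) (some 0) = some 0 := by
          intro x
          cases x with
          | none => rfl
          | some i => simp [pvOmin]
        simp [List.findIdx?_cons, hf, hg, h0]
      · simp [List.findIdx?_cons, hf, hg, ← ih, pvOmin_map_succ]

theorem pvFoldMin_findIdx? {α : Type} (l : List α) (P : Nat → α → Bool) :
    ∀ (js : List Nat) (acc : Option Nat),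
      js.foldl (fun b j => pvOmin b (l.findIdx? (P j))) acc =
        pvOmin acc (l.findIdx? (fun v => js.any (fun j => P j v))) := by
  intro js
  induction js with
  | nil =>
    intro acc
    simp [List.findIdx?_eq_none_iff.mpr (fun x _ => rfl), pvOmin_none_right]
  | cons j js ih =>
    intro acc
    simp only [List.foldl_cons, ih, pvOmin_assoc, pvFindIdx?_or]
    simp [List.any_cons]

theorem pvSetdefaultFold_get? (ks : List (List Char × List Char)) (i : Nat) :
    ∀ (d : PySem.Dict (List Char × List Char) Nat) (k : List Char × List Char),
      ((ks.foldl (fun d k' => d.setdefault k' i) d).get? k) =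
        (d.get? k).or (if k ∈ ks then some i else none) := by
  induction ks with
  | nil => intro d k; simp
  | cons k' ks ih =>
    intro d k
    simp only [List.foldl_cons]
    rw [ih]
    by_cases hk : k = k'
    · subst hk
      rw [PySem.Dict.get?_setdefault_self, if_pos (List.mem_cons_self)]
      cases hg : d.get? k <;> simp [hg]
    · rw [PySem.Dict.get?_setdefault_of_ne d i hk]
      congr 1
      simp [List.mem_cons, hk]

theorem pvBuildIdx_get? :
    ∀ (vs : List String) (i : Nat) (d : PySem.Dict (List Char × List Char) Nat)
      (k : List Char × List Char),
      (pvBuildIdx vs i d).get? k =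
        (d.get? k).or ((vs.findIdx? (fun v => decide (k ∈ pvMaskKeys v.toList))).map (· + i)) := by
  intro vs
  induction vs with
  | nil => intro i d k; simp [pvBuildIdx]
  | cons v vs ih =>
    intro i d k
    simp only [pvBuildIdx]
    rw [ih, pvSetdefaultFold_get?, Option.or_assoc, List.findIdx?_cons]
    by_cases hm : k ∈ pvMaskKeys v.toList
    · rw [if_pos hm, show (decide (k ∈ pvMaskKeys v.toList)) = true from decide_eq_true hm]
      simp
    · rw [if_neg hm, show (decide (k ∈ pvMaskKeys v.toList)) = false from decide_eq_false hm]
      simp only [Bool.false_eq_true, if_false, Option.none_or, Option.map_map]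
      congr 1
      cases hF : vs.findIdx? (fun v => decide (k ∈ pvMaskKeys v.toList)) with
      | none => rfl
      | some x =>
        simp
        omega

-- membership of p's j-th mask key among v's mask keys, for j < |p|
theorem pvMaskMem (p v : List Char) (j : Nat) (hj : j < p.length) :
    ((p.take j, p.drop (j + 1)) ∈ pvMaskKeys v ↔
      (v.length = p.length ∧ v.take j = p.take j ∧ v.drop (j + 1) = p.drop (j + 1))) := by
  constructor
  · intro hm
    simp only [pvMaskKeys, List.mem_map, List.mem_range] at hm
    obtain ⟨j', hj', heq⟩ := hm
    have h1 : v.take j' = p.take j := by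
      have := congrArg Prod.fst heq; simpa using this
    have h2 : v.drop (j' + 1) = p.drop (j + 1) := by
      have := congrArg Prod.snd heq; simpa using this
    have hjj : j' = j := by
      have e1 : (v.take j').length = j' := by simp [List.length_take]; omega
      have e2 : (p.take j).length = j := by simp [List.length_take]; omega
      rw [h1, e2] at e1; omega
    subst hjj
    have hlen : v.length = p.length := by
      have l1 : (v.drop (j' + 1)).length = v.length - (j' + 1) := by simp
      have l2 : (p.drop (j' + 1)).length = p.length - (j' + 1) := by simp
      rw [h2, l2] at l1
      omega
    exact ⟨hlen, h1, h2⟩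
  · rintro ⟨hlen, h1, h2⟩
    simp only [pvMaskKeys, List.mem_map, List.mem_range]
    exact ⟨j, by omega, by rw [h1, h2]⟩

theorem pvBFind_eq (vocab : List String) (p : String) :
    pvBFind vocab (pvBuildIdx vocab 0 (PySem.Dict.mk []))
        (PySem.Set.ofList (vocab.map (fun v => v.toList.length))) p =
      match vocab.findIdx? (fun v => (List.range p.toList.length).any
          (fun j => decide ((p.toList.take j, p.toList.drop (j + 1)) ∈ pvMaskKeys v.toList))) with
      | none => p
      | some b => vocab.getD b p := by
  unfold pvBFind
  by_cases hl : p.toList.length ∈ vocab.map (fun v => v.toList.length)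
  case neg =>
    have hcl : ¬ (PySem.Set.contains
        (PySem.Set.ofList (vocab.map (fun v => v.toList.length))) p.toList.length = true) := by
      show ¬ (List.contains _ _ = true)
      rw [List.contains_iff_mem]
      intro hmem
      exact hl ((PySem.Set.mem_ofList _ _).mp hmem)
    rw [if_neg hcl]
    have hnone : vocab.findIdx? (fun v => (List.range p.toList.length).any
        (fun j => decide ((p.toList.take j, p.toList.drop (j + 1)) ∈ pvMaskKeys v.toList))) = none := by
      rw [List.findIdx?_eq_none_iff]
      intro v hv
      rw [List.any_eq_false]
      intro j hjr
      simp only [decide_eq_true_eq]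
      intro hm
      have hj := List.mem_range.mp hjr
      have hlen := ((pvMaskMem p.toList v.toList j hj).mp hm).1
      exact hl (List.mem_map.mpr ⟨v, hv, hlen⟩)
    rw [hnone]
  case pos =>
  have hcl : PySem.Set.contains
      (PySem.Set.ofList (vocab.map (fun v => v.toList.length))) p.toList.length = true := by
    show List.contains _ _ = true
    rw [List.contains_iff_mem]
    exact (PySem.Set.mem_ofList _ _).mpr hl
  rw [if_pos hcl]
  have hget : ∀ j : Nat, (pvBuildIdx vocab 0 (PySem.Dict.mk [])).get?
      (p.toList.take j, p.toList.drop (j + 1)) =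
      vocab.findIdx? (fun v => decide ((p.toList.take j, p.toList.drop (j + 1)) ∈ pvMaskKeys v.toList)) := by
    intro j
    rw [pvBuildIdx_get?]
    have h0 : (PySem.Dict.mk ([] : List ((List Char × List Char) × Nat))).get?
        (p.toList.take j, p.toList.drop (j + 1)) = none := rfl
    rw [h0]
    cases vocab.findIdx? (fun v => decide ((p.toList.take j, p.toList.drop (j + 1)) ∈ pvMaskKeys v.toList)) <;>
      simp
  simp only [hget]
  rw [pvFoldMin_findIdx? vocab
    (fun j v => decide ((p.toList.take j, p.toList.drop (j + 1)) ∈ pvMaskKeys v.toList))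
    (List.range p.toList.length) none]
  rw [pvOmin_none_left]

theorem pvMismatch_cons (a b : Char) (p v : List Char) :
    pvMismatch (a :: p) (b :: v) = (if a ≠ b then 1 else 0) + pvMismatch p v := by
  simp [pvMismatch]

-- mismatch count is zero iff the equal-length lists are equal
theorem pvSumZero (p : List Char) :
    ∀ v : List Char, p.length = v.length → (pvMismatch p v = 0 ↔ p = v) := by
  induction p with
  | nil =>
    intro v h
    cases v with
    | nil => simp [pvMismatch]
    | cons b v => simp at h
  | cons a p ih =>
    intro v h
    cases v with
    | nil => simp at h
    | cons b v =>
      rw [pvMismatch_cons]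
      by_cases hab : a = b
      · subst hab
        rw [if_neg (by simp)]
        simp only [List.length_cons] at h
        rw [Nat.zero_add, ih v (by omega)]
        simp
      · rw [if_pos hab]
        constructor
        · intro hz; omega
        · intro he
          injection he with h1 h2
          exact absurd h1 hab

-- a Hamming-≤1 match (p ≠ v, equal lengths) is exactly a one-masked-position match
theorem pvHamIff (p : List Char) :
    ∀ v : List Char, p.length = v.length → p ≠ v →
      ((pvMismatch p v ≤ 1) ↔
        ∃ j, j < p.length ∧ v.take j = p.take j ∧ v.drop (j + 1) = p.drop (j + 1)) := by
  induction p with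
  | nil =>
    intro v h hne
    cases v with
    | nil => exact absurd rfl hne
    | cons b v => simp at h
  | cons a p ih =>
    intro v h hne
    cases v with
    | nil => simp at h
    | cons b v =>
      simp only [List.length_cons] at h
      rw [pvMismatch_cons]
      by_cases hab : a = b
      · subst hab
        have hne' : p ≠ v := fun hh => hne (by rw [hh])
        rw [if_neg (by simp), Nat.zero_add, ih v (by omega) hne']
        constructor
        · rintro ⟨j, hj, h1, h2⟩
          exact ⟨j + 1, by simpa using hj, by simpa using h1, by simpa using h2⟩
        · rintro ⟨j, hj, h1, h2⟩
          cases j with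
          | zero =>
            simp only [List.take_zero, List.drop_succ_cons, List.drop_zero] at h1 h2
            exact absurd h2.symm hne'
          | succ j =>
            refine ⟨j, by simpa using hj, ?_, ?_⟩
            · simpa using h1
            · simpa using h2
      · rw [if_pos hab]
        constructor
        · intro hs
          have h0 : pvMismatch p v = 0 := by omega
          have := (pvSumZero p v (by omega)).mp h0
          exact ⟨0, by simp, by simp, by simpa using this.symm⟩
        · rintro ⟨j, hj, h1, h2⟩
          cases j with
          | zero =>
            simp only [List.drop_succ_cons, List.drop_zero] at h2
            have := (pvSumZero p v (by omega)).mpr h2.symm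
            omega
          | succ j =>
            exfalso
            simp only [List.take_succ_cons, List.cons.injEq] at h1
            exact hab h1.1.symm

theorem pvFindIdx?_congr_mem {α : Type} (l : List α) (f g : α → Bool)
    (h : ∀ x ∈ l, f x = g x) : l.findIdx? f = l.findIdx? g := by
  induction l with
  | nil => rfl
  | cons a l ih =>
    simp only [List.findIdx?_cons, h a (by simp)]
    rw [ih (fun x hx => h x (by simp [hx]))]

-- the predicate B effectively searches with equals A's predicate, on every v ≠ p
theorem pvPred_eq (p v : String) (hne : v ≠ p) :
    ((List.range p.toList.length).any
        (fun j => decide ((p.toList.take j, p.toList.drop (j + 1)) ∈ pvMaskKeys v.toList)))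
      = pvApred p v := by
  have hne' : p.toList ≠ v.toList := by
    intro hh
    exact hne (by apply String.ext; exact hh.symm)
  rw [Bool.eq_iff_iff]
  simp only [List.any_eq_true, List.mem_range, decide_eq_true_eq, pvApred]
  constructor
  · rintro ⟨j, hj, hm⟩
    obtain ⟨hlen, h1, h2⟩ := (pvMaskMem p.toList v.toList j hj).mp hm
    refine ⟨hlen.symm, ?_⟩
    rw [pvHamIff p.toList v.toList hlen.symm hne']
    exact ⟨j, hj, h1, h2⟩
  · rintro ⟨hlen, hsum⟩
    obtain ⟨j, hj, h1, h2⟩ := (pvHamIff p.toList v.toList hlen hne').mp hsum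
    exact ⟨j, hj, (pvMaskMem p.toList v.toList j hj).mpr ⟨hlen.symm, h1, h2⟩⟩

-- the two membership tests agree
theorem pvContains_eq (vocab : List String) (p : String) :
    PySem.Set.contains (PySem.Set.ofList vocab) p = vocab.contains p := by
  rw [Bool.eq_iff_iff]
  show List.contains (PySem.Set.ofList vocab) p = true ↔ _
  rw [List.contains_iff_mem, List.contains_iff_mem]
  exact PySem.Set.mem_ofList vocab p

-- per-word agreement of the two searches when the word is not in the vocabulary
theorem pvFind_eq (vocab : List String) (p : String) (hmem : ¬ vocab.contains p = true) :
    pvAFind p vocab = pvBFind vocab (pvBuildIdx vocab 0 (PySem.Dict.mk []))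
      (PySem.Set.ofList (vocab.map (fun v => v.toList.length))) p := by
  have hnp : ∀ v ∈ vocab, v ≠ p := by
    intro v hv hvp
    subst hvp
    exact hmem (List.contains_iff_mem.mpr hv)
  rw [pvBFind_eq, pvAFind_eq_findIdx?,
    pvFindIdx?_congr_mem vocab _ (pvApred p) (fun v hv => pvPred_eq p v (hnp v hv))]

-- ===== VERDICT (by name: the statement is the Claim_ definition above) =====
theorem corrigir_ortografia_spec : Claim_equal_corrigir_ortografia := by
  intro texto vocab _
  show corrigir_ortografia texto vocab = corrigir_ortografia_alt texto vocab
  simp only [corrigir_ortografia, corrigir_ortografia_alt]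
  have hbody : (fun (acc : List String) (p : String) =>
      if vocab.contains p then acc ++ [p] else acc ++ [pvAFind p vocab]) =
      (fun (acc : List String) (p : String) =>
        if PySem.Set.contains (PySem.Set.ofList vocab) p then acc ++ [p]
        else acc ++ [pvBFind vocab (pvBuildIdx vocab 0 (PySem.Dict.mk []))
          (PySem.Set.ofList (vocab.map (fun v => v.toList.length))) p]) := by
    funext acc p
    rw [pvContains_eq]
    by_cases h : vocab.contains p
    · rw [if_pos h, if_pos h]
    · rw [if_neg h, if_neg h, pvFind_eq vocab p h]
  rw [hbody]
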